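-- pv_equiv track=rewrite | github.com/TrTree/long_emotion_competition | src/utils.py | last_client_turn
-- ===== SOURCE A (Python) =====
-- def last_client_turn(dialog: str) -> str:
--     """Return the content of the last utterance prefixed with 'Client:'."""
--
--     if not dialog:
--         return ""
--
--     for line in reversed(dialog.splitlines()):
--         line = line.strip()
--         if not line:
--             continue
--         if line.startswith("Client:"):
--             return line[len("Client:") :].strip()
--     return ""
-- ===== SOURCE B (Python) =====
-- def last_client_turn(dialog: str) -> str:
--     """Return the content of the last utterance prefixed with 'Client:'."""
--     result = ""
--     for line in dialog.splitlines():
--         s = line.strip()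
--         if s.startswith("Client:"):
--             result = s[len("Client:"):].strip()
--     return result
-- ===== Notes on version B (the rewrite author's own statement) =====
-- stated objective: simpler
-- what changed: Replaces the reverse scan with early return (and its redundant empty-dialog and blank-line guards) by a single forward pass that overwrites an accumulator whenever a line carries the client prefix and returns it after the loop.
import Mathlib
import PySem

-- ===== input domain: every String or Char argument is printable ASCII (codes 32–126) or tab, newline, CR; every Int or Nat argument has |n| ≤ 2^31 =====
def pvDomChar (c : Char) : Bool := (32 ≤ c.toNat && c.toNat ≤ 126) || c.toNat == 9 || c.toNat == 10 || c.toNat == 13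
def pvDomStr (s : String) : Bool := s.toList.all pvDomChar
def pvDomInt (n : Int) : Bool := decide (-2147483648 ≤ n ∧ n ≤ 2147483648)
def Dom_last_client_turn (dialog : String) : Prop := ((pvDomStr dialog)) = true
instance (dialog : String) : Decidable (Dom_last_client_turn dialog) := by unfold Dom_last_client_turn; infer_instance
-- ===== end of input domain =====

-- B changes A's reverse scan with early return into a forward pass keeping the
-- last 'Client:' match in an accumulator (objective: simpler).

-- ===== PORT A =====
-- reversed-splitlines loop with early return; blank stripped lines are skipped
def lct_revScan : List String → String
  | [] => ""
  | l :: rest =>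
      let s := PySem.Str.strip l
      if s = "" then lct_revScan rest
      else if PySem.Str.startswith s "Client:" then
        PySem.Str.strip (PySem.Str.slice s (some 7) none)
      else lct_revScan rest

def last_client_turn (dialog : String) : String :=
  if dialog = "" then ""
  else lct_revScan (PySem.Str.splitlines dialog).reverse

-- ===== PORT B =====
def last_client_turn_alt (dialog : String) : String :=
  (PySem.Str.splitlines dialog).foldl
    (fun result line =>
      let s := PySem.Str.strip line
      if PySem.Str.startswith s "Client:" then
        PySem.Str.strip (PySem.Str.slice s (some 7) none)
      else result) ""

-- ===== PRECONDITION & SPEC =====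
def Spec_last_client_turn (dialog : String) (out : String) : Prop := out = last_client_turn_alt dialog
instance (dialog : String) (out : String) : Decidable (Spec_last_client_turn dialog out) := by unfold Spec_last_client_turn; infer_instance

-- ===== CLAIM (what is proved, stated in full; the proofs are below) =====
def Claim_equal_last_client_turn : Prop := ∀ (dialog : String), Dom_last_client_turn dialog → Spec_last_client_turn dialog (last_client_turn dialog)

-- ===== LEMMAS AND PROOFS =====

-- A's reverse scan with an explicit default accumulator (proof helper)
def lct_revScanAcc : List String → String → String
  | [], a => a
  | l :: rest, a =>
      let s := PySem.Str.strip l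
      if PySem.Str.startswith s "Client:" then
        PySem.Str.strip (PySem.Str.slice s (some 7) none)
      else lct_revScanAcc rest a

-- blank stripped lines never start with "Client:", so A's skip branch is absorbed
theorem lct_revScan_eq_acc (rs : List String) : lct_revScan rs = lct_revScanAcc rs "" := by
  induction rs with
  | nil => rfl
  | cons l rest ih =>
    simp only [lct_revScan, lct_revScanAcc]
    by_cases h : PySem.Str.strip l = ""
    · rw [if_pos h, h]
      rw [if_neg (by simp; decide), ih]
    · rw [if_neg h, ih]

-- B's forward fold equals A's reverse scan, for any accumulator
theorem foldl_eq_revScanAcc (xs : List String) (a : String) :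
    xs.foldl
      (fun result line =>
        let s := PySem.Str.strip line
        if PySem.Str.startswith s "Client:" then
          PySem.Str.strip (PySem.Str.slice s (some 7) none)
        else result) a = lct_revScanAcc xs.reverse a := by
  induction xs using List.reverseRecOn generalizing a with
  | nil => rfl
  | append_singleton xs x ih =>
    rw [List.foldl_append, List.reverse_append]
    simp only [List.foldl_cons, List.foldl_nil, List.reverse_singleton,
      List.singleton_append, lct_revScanAcc]
    by_cases h : PySem.Str.startswith (PySem.Str.strip x) "Client:" = true
    · simp only [h, if_true]
    · simp only [eq_false_of_ne_true h, ih]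

-- ===== VERDICT (by name: the statement is the Claim_ definition above) =====
theorem last_client_turn_spec : Claim_equal_last_client_turn := by
  intro dialog _
  unfold Spec_last_client_turn last_client_turn last_client_turn_alt
  by_cases h : dialog = ""
  · subst h; decide
  · rw [if_neg h, lct_revScan_eq_acc, foldl_eq_revScanAcc]
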